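-- pv_equiv track=rewrite | github.com/mgmk2/atcoder-python | ABC/197/c.py | f
-- ===== SOURCE A (Python) =====
-- def f(a, x):
--     m = len(a)
--     ans = 0
--     for ai in a:
--         ans = ans | ai
--     if x is not None:
--         ans = ans ^ x
--
--     for i in range(1, m):
--         p = 0
--         for j in range(i):
--             p = p | a[j]
--         ans = min(ans, f(a[i:], p if x is None else p ^ x))
--
--     return ans
-- ===== SOURCE B (Python) =====
-- def f(a, x):
--     base = 0 if x is None else x
--     m = len(a)
--     if m == 0:
--         return base
--     best = None
--     for mask in range(1 << (m - 1)):
--         acc = 0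
--         cur = a[0]
--         rm = mask
--         for e in a[1:]:
--             if rm % 2 == 1:
--                 acc ^= cur
--                 cur = e
--             else:
--                 cur |= e
--             rm //= 2
--         val = base ^ acc ^ cur
--         best = val if best is None else min(best, val)
--     return best
-- ===== Notes on version B (the rewrite author's own statement) =====
-- stated objective: alternative
-- what changed: A enumerates partitions by recursive suffix splitting (for each first-cut position it recurses on the suffix, re-deriving segment ORs and taking min over recursive results); B is non-recursive: it iterates over all 2^(m-1) cut-set bitmasks and, for each mask, walks the list once accumulating segment ORs into a running XOR, keeping a running minimum.
import Mathlib
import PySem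

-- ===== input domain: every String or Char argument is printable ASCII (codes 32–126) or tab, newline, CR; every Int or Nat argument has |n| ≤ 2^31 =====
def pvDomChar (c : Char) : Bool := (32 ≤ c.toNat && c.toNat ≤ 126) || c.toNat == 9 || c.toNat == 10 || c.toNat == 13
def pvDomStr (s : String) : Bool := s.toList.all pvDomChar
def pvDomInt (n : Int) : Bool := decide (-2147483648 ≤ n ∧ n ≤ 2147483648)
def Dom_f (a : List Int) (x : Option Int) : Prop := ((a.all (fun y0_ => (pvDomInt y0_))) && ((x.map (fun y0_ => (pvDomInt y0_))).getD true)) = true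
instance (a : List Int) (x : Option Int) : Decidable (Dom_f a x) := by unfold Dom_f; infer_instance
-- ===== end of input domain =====

-- B replaces A's recursive suffix-splitting enumeration of partitions by a flat
-- iterative loop over cut-set bitmasks (same exact minimum, different decomposition).

-- ===== PORT A =====
-- literal transliteration of A: OR of the whole list XOR x, then for every first-cut
-- position i recurse on the suffix a[i:] with the first segment's OR folded into x.
def f (a : List Int) (x : Option Int) : Int :=
  let m : Int := (a.length : Int)
  let ans0 : Int := a.foldl (fun ans ai => PySem.Int.bor ans ai) 0
  let ans1 : Int := match x with
    | none => ans0
    | some v => PySem.Int.bxor ans0 v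
  (PySem.List.pyRange 1 m 1).attach.foldl
    (fun ans i =>
      let p : Int := (PySem.List.pyRange 0 i.1 1).foldl
        (fun p j => PySem.Int.bor p (PySem.List.pyGetD a j 0)) 0
      min ans (f (PySem.List.slice a (some i.1) none)
        (some (match x with | none => p | some v => PySem.Int.bxor p v))))
    ans1
termination_by a.length
decreasing_by
  have hi := (PySem.List.mem_pyRange_one).1 i.2
  rw [PySem.List.slice_from _ (by omega : (0:Int) ≤ i.1)]
  simp only [List.length_drop]
  omega

-- ===== PORT B =====
-- literal transliteration of B (Source B): enumerate every cut-set bitmask, walk the list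
-- once per mask accumulating segment ORs into a running XOR, keep the running minimum.
def f_alt (a : List Int) (x : Option Int) : Int :=
  let base : Int := match x with | none => 0 | some v => v
  let m : Nat := a.length
  if m = 0 then base
  else
    let best : Option Int :=
      (PySem.List.pyRange 0 ((2 ^ (m - 1) : Nat) : Int) 1).foldl
        (fun best mask =>
          let st : Int × Int × Int :=
            (PySem.List.slice a (some 1) none).foldl
              (fun (st : Int × Int × Int) e =>
                if PySem.Int.mod st.2.2 2 = 1 then
                  (PySem.Int.bxor st.1 st.2.1, e, PySem.Int.floordiv st.2.2 2)
                else
                  (st.1, PySem.Int.bor st.2.1 e, PySem.Int.floordiv st.2.2 2))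
              (0, PySem.List.pyGetD a 0 0, mask)
          let val : Int := PySem.Int.bxor (PySem.Int.bxor base st.1) st.2.1
          match best with
          | none => some val
          | some b => some (min b val))
        none
    -- the mask loop runs at least once (2^(m-1) ≥ 1), so 'best' is always 'some'
    best.getD 0

-- ===== PRECONDITION & SPEC =====
def Spec_f (a : List Int) (x : Option Int) (out : Int) : Prop := out = f_alt a x
instance (a : List Int) (x : Option Int) (out : Int) : Decidable (Spec_f a x out) := by unfold Spec_f; infer_instance

-- ===== CLAIM (what is proved, stated in full; the proofs are below) =====
def Claim_equal_f : Prop := ∀ (a : List Int) (x : Option Int), Dom_f a x → Spec_f a x (f a x)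

-- ===== LEMMAS AND PROOFS =====

-- ---- facts about PySem's Python-exact bitwise operators ----
theorem pv_bxor_nn (m n : Nat) : PySem.Int.bxor (m : Int) (Int.negSucc n) = Int.negSucc (m ^^^ n) := by
  simp only [PySem.Int.bxor, Int.negSucc_eq]
  rw [if_pos (by positivity), if_neg (by omega)]
  have h2 : (- -((n:Int) + 1) - 1).toNat = n := by omega
  have h3 : ((m:Int)).toNat = m := by omega
  rw [h2, h3]; omega

theorem pv_bxor_np (m n : Nat) : PySem.Int.bxor (Int.negSucc m) (n : Int) = Int.negSucc (m ^^^ n) := by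
  rw [PySem.Int.bxor_comm, pv_bxor_nn, Nat.xor_comm]

theorem pv_bxor_negneg (m n : Nat) : PySem.Int.bxor (Int.negSucc m) (Int.negSucc n) = ((m ^^^ n : Nat) : Int) := by
  simp only [PySem.Int.bxor, Int.negSucc_eq]
  rw [if_neg (by omega), if_neg (by omega)]
  have h3 : (- -((m:Int) + 1) - 1).toNat = m := by omega
  have h4 : (- -((n:Int) + 1) - 1).toNat = n := by omega
  rw [h3, h4]

theorem pv_bxor_assoc (a b c : Int) :
    PySem.Int.bxor (PySem.Int.bxor a b) c = PySem.Int.bxor a (PySem.Int.bxor b c) := by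
  rcases a with a | a <;> rcases b with b | b <;> rcases c with c | c <;>
    simp [pv_bxor_nn, pv_bxor_np, pv_bxor_negneg, Nat.xor_assoc]

theorem pv_zero_bxor (a : Int) : PySem.Int.bxor 0 a = a := by
  rw [PySem.Int.bxor_comm]; simp

theorem pv_zero_bor (a : Int) : PySem.Int.bor 0 a = a := by
  rw [PySem.Int.bor_comm]; simp

-- ---- option-min: Python's running "best = val if best is None else min(best, val)" ----
def ostep (o : Option Int) (v : Int) : Option Int :=
  some (match o with | none => v | some b => min b v)

def omin (l : List Int) : Option Int := l.foldl ostep none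

theorem pv_foldl_min_comm (l : List Int) : ∀ s v : Int, min s (l.foldl min v) = l.foldl min (min s v) := by
  induction l with
  | nil => intro s v; rfl
  | cons h t ih =>
    intro s v
    simp only [List.foldl_cons]
    rw [ih, min_assoc]

theorem pv_foldl_ostep_some (l : List Int) : ∀ b : Int, l.foldl ostep (some b) = some (l.foldl min b) := by
  induction l with
  | nil => intro b; rfl
  | cons h t ih => intro b; simp only [List.foldl_cons]; exact ih _

theorem pv_omin_cons (v : Int) (l : List Int) : omin (v :: l) = some (l.foldl min v) := by
  simp only [omin, List.foldl_cons]
  exact pv_foldl_ostep_some l v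

theorem pv_omin_perm {l1 l2 : List Int} (h : l1.Perm l2) : omin l1 = omin l2 := by
  haveI : RightCommutative ostep := ⟨by
    intro o a b
    cases o with
    | none => simp [ostep, min_comm]
    | some c => simp [ostep, min_right_comm]⟩
  exact h.foldl_eq none

-- ---- the list of all partition values (one entry per cut-set) ----
def orAll (l : List Int) : Int := l.foldl PySem.Int.bor 0

def vals : List Int → List Int
  | [] => [0]
  | [a0] => [a0]
  | a0 :: a1 :: t =>
    ((vals (a1 :: t)).map (fun v => PySem.Int.bxor a0 v)) ++ vals (PySem.Int.bor a0 a1 :: t)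
termination_by l => l.length
decreasing_by all_goals (simp only [List.length_cons]; omega)

theorem pv_vals_ne (a : List Int) : vals a ≠ [] := by
  match a with
  | [] => simp [vals]
  | [a0] => simp [vals]
  | a0 :: a1 :: t =>
    have h := pv_vals_ne (PySem.Int.bor a0 a1 :: t)
    simp [vals, h]
termination_by a.length
decreasing_by simp only [List.length_cons]; omega

-- first-cut decomposition term: all partition values whose first segment is a[:k+1]
def fdTerm (a : List Int) (k : Nat) : List Int :=
  (vals (a.drop (k + 1))).map (fun v => PySem.Int.bxor (orAll (a.take (k + 1))) v)

theorem pv_L0 (a : List Int) (h : a ≠ []) :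
    (vals a).Perm (orAll a :: (List.range (a.length - 1)).flatMap (fdTerm a)) := by
  match a with
  | [] => exact absurd rfl h
  | [a0] => simp [vals, orAll, pv_zero_bor]
  | a0 :: a1 :: t =>
    have IH := pv_L0 (PySem.Int.bor a0 a1 :: t) (by simp)
    have F1 : orAll (PySem.Int.bor a0 a1 :: t) = orAll (a0 :: a1 :: t) := by
      simp [orAll, List.foldl_cons, pv_zero_bor]
    have F2 : ∀ j : Nat, fdTerm (a0 :: a1 :: t) (j + 1) = fdTerm (PySem.Int.bor a0 a1 :: t) j := by
      intro j
      unfold fdTerm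
      have hd : (PySem.Int.bor a0 a1 :: t).drop (j + 1) = (a0 :: a1 :: t).drop (j + 1 + 1) := by
        simp [List.drop_succ_cons]
      have ht : orAll ((PySem.Int.bor a0 a1 :: t).take (j + 1)) = orAll ((a0 :: a1 :: t).take (j + 1 + 1)) := by
        simp only [List.take_succ_cons]
        simp [orAll, List.foldl_cons, pv_zero_bor]
      rw [hd, ht]
    have F3 : fdTerm (a0 :: a1 :: t) 0 = (vals (a1 :: t)).map (fun v => PySem.Int.bxor a0 v) := by
      unfold fdTerm
      simp [orAll, pv_zero_bor]
    have hv : vals (a0 :: a1 :: t)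
        = ((vals (a1 :: t)).map (fun v => PySem.Int.bxor a0 v)) ++ vals (PySem.Int.bor a0 a1 :: t) := by
      simp [vals]
    rw [hv]
    have hr : List.range ((a0 :: a1 :: t).length - 1) = 0 :: (List.range t.length).map Nat.succ := by
      simp [List.range_succ_eq_map]
    rw [hr]
    simp only [List.flatMap_cons, F3]
    have hfm : ((List.range t.length).map Nat.succ).flatMap (fdTerm (a0 :: a1 :: t))
        = (List.range t.length).flatMap (fdTerm (PySem.Int.bor a0 a1 :: t)) := by
      rw [List.flatMap_map]
      congr 1
      funext j
      exact F2 j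
    rw [hfm]
    have hlen : (PySem.Int.bor a0 a1 :: t).length - 1 = t.length := by simp
    rw [hlen, F1] at IH
    refine (List.Perm.append_left _ IH).trans ?_
    have hm : ((vals (a1 :: t)).map (fun v => PySem.Int.bxor a0 v)) ++
          (orAll (a0 :: a1 :: t) :: (List.range t.length).flatMap (fdTerm (PySem.Int.bor a0 a1 :: t)))
        |>.Perm (orAll (a0 :: a1 :: t) ::
          (((vals (a1 :: t)).map (fun v => PySem.Int.bxor a0 v)) ++
            (List.range t.length).flatMap (fdTerm (PySem.Int.bor a0 a1 :: t)))) := List.perm_middle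
    exact hm
termination_by a.length
decreasing_by simp only [List.length_cons]; omega

-- ---- A's loop in structured form ----
theorem pv_orTake (a : List Int) : ∀ kk : Nat, kk ≤ a.length →
    (PySem.List.pyRange 0 (kk : Int) 1).foldl
      (fun p j => PySem.Int.bor p (PySem.List.pyGetD a j 0)) 0 = orAll (a.take kk) := by
  intro kk
  induction kk with
  | zero => intro _; simp [PySem.List.pyRange_one_eq_nil, orAll]
  | succ kk ih =>
    intro hlt
    have h1 : ((kk : Int) + 1) = ((kk + 1 : Nat) : Int) := by push_cast; ring
    rw [← h1, PySem.List.pyRange_one_succ_right (by positivity), List.foldl_append,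
        ih (by omega)]
    have h2 : a.take (kk + 1) = a.take kk ++ [a[kk]'(by omega)] := by
      rw [List.take_add_one]
      simp [List.getElem?_eq_getElem (by omega : kk < a.length)]
    rw [h2]
    simp only [orAll, List.foldl_append, List.foldl_cons, List.foldl_nil]
    rw [PySem.List.pyGetD_natCast, List.getD_eq_getElem _ _ (by omega)]

theorem pv_fA_eq (a : List Int) (b : Int) :
    f a (some b) = (List.range (a.length - 1)).foldl
      (fun ans k => min ans (f (a.drop (k + 1)) (some (PySem.Int.bxor (orAll (a.take (k + 1))) b))))
      (PySem.Int.bxor (orAll a) b) := by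
  set g : Int → Int → Int := (fun (ans : Int) (iv : Int) =>
        min ans (f (PySem.List.slice a (some iv) none)
          (some (PySem.Int.bxor ((PySem.List.pyRange 0 iv 1).foldl
            (fun p j => PySem.Int.bor p (PySem.List.pyGetD a j 0)) 0) b)))) with hg
  have h0 : f a (some b) = (PySem.List.pyRange 1 (a.length : Int) 1).attach.foldl
      (fun ans i => g ans i.1)
      (PySem.Int.bxor (orAll a) b) := by
    rw [f]; rfl
  rw [h0, List.foldl_attach (f := g)]
  rw [PySem.List.pyRange_one]
  have h1 : ((a.length : Int) - 1).toNat = a.length - 1 := by omega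
  rw [h1, List.foldl_map]
  refine PySem.List.foldl_congr_mem _ _ _ _ ?_
  intro acc k hk
  have hk' : k < a.length - 1 := List.mem_range.1 hk
  have h2 : (1 + (k : Int)) = ((k + 1 : Nat) : Int) := by push_cast; ring
  simp only [hg]
  rw [h2]
  rw [PySem.List.slice_from _ (by positivity), pv_orTake a (k+1) (by omega)]
  have h3 : ((k + 1 : Nat) : Int).toNat = k + 1 := by omega
  rw [h3]

-- generic: a fold of 'min' against blocks whose omin is known
theorem pv_M3 {ι : Type} (c : ι → Int) (g : ι → List Int) (ks : List ι) :
    ∀ s : Int, (∀ k ∈ ks, some (c k) = omin (g k)) →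
      some (ks.foldl (fun ans k => min ans (c k)) s) = omin (s :: ks.flatMap g) := by
  induction ks with
  | nil => intro s _; simp [omin, ostep]
  | cons k ks ih =>
    intro s hcg
    have hk : some (c k) = omin (g k) := hcg k (by simp)
    cases hgk : g k with
    | nil => rw [hgk] at hk; simp [omin] at hk
    | cons gh gt =>
      rw [hgk, pv_omin_cons] at hk
      have hck : c k = gt.foldl min gh := Option.some.inj hk
      simp only [List.foldl_cons, List.flatMap_cons]
      rw [ih (min s (c k)) (fun k' hk' => hcg k' (by simp [hk']))]
      have e1 : ∀ (y : Int) (l : List Int), omin (y :: l) = l.foldl ostep (some y) := by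
        intro y l; rfl
      rw [e1, e1, hgk]
      rw [List.foldl_append]
      have e2 : (gh :: gt).foldl ostep (some s) = some ((gh :: gt).foldl min s) :=
        pv_foldl_ostep_some _ s
      rw [e2]
      have e3 : min s (c k) = (gh :: gt).foldl min s := by
        rw [hck]
        simp only [List.foldl_cons]
        rw [pv_foldl_min_comm]
      rw [e3]

-- A computes the minimum over all partition values (each XORed with b)
theorem pv_LA (a : List Int) (h : a ≠ []) (b : Int) :
    some (f a (some b)) = omin ((vals a).map (fun v => PySem.Int.bxor v b)) := by
  rw [pv_fA_eq]
  have hcg : ∀ k ∈ List.range (a.length - 1),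
      some (f (a.drop (k+1)) (some (PySem.Int.bxor (orAll (a.take (k+1))) b)))
        = omin ((fdTerm a k).map (fun v => PySem.Int.bxor v b)) := by
    intro k hk
    have hk' : k < a.length - 1 := List.mem_range.1 hk
    have hne : a.drop (k+1) ≠ [] := by
      intro hc
      have := congrArg List.length hc
      simp at this
      omega
    rw [pv_LA (a.drop (k+1)) hne (PySem.Int.bxor (orAll (a.take (k+1))) b)]
    congr 1
    unfold fdTerm
    rw [List.map_map]
    refine List.map_congr_left ?_
    intro v _
    simp only [Function.comp]
    rw [← pv_bxor_assoc, PySem.Int.bxor_comm v (orAll (a.take (k+1)))]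
  rw [pv_M3 _ _ _ _ hcg]
  refine (pv_omin_perm ?_).symm
  have he : (orAll a :: (List.range (a.length - 1)).flatMap (fdTerm a)).map (fun v => PySem.Int.bxor v b)
      = PySem.Int.bxor (orAll a) b ::
          (List.range (a.length - 1)).flatMap (fun k => (fdTerm a k).map (fun v => PySem.Int.bxor v b)) := by
    simp [List.map_flatMap]
  exact he ▸ ((pv_L0 a h).map _)
termination_by a.length
decreasing_by
  simp only [List.length_drop]
  have hl : 0 < a.length := List.length_pos_iff.mpr h
  omega

-- ---- B side: one walk of the list per mask ----
def walk : Int → Int → Int → List Int → Int × Int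
  | acc, cur, _, [] => (acc, cur)
  | acc, cur, rm, e :: t =>
    if PySem.Int.mod rm 2 = 1 then walk (PySem.Int.bxor acc cur) e (PySem.Int.floordiv rm 2) t
    else walk acc (PySem.Int.bor cur e) (PySem.Int.floordiv rm 2) t

def maskVal (a0 : Int) (t : List Int) (rm : Int) : Int :=
  PySem.Int.bxor (walk 0 a0 rm t).1 (walk 0 a0 rm t).2

theorem pv_W1 (t : List Int) : ∀ x acc cur rm,
    walk (PySem.Int.bxor x acc) cur rm t
      = (PySem.Int.bxor x (walk acc cur rm t).1, (walk acc cur rm t).2) := by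
  induction t with
  | nil => intro x acc cur rm; rfl
  | cons e t ih =>
    intro x acc cur rm
    by_cases hm : PySem.Int.mod rm 2 = 1
    · simp only [walk, hm, if_pos, pv_bxor_assoc]
      exact ih _ _ _ _
    · simp only [walk, hm, if_false]
      exact ih _ _ _ _

theorem pv_walk_foldl (t : List Int) : ∀ acc cur rm : Int,
    ((t.foldl (fun (st : Int × Int × Int) e =>
        if PySem.Int.mod st.2.2 2 = 1 then
          (PySem.Int.bxor st.1 st.2.1, e, PySem.Int.floordiv st.2.2 2)
        else
          (st.1, PySem.Int.bor st.2.1 e, PySem.Int.floordiv st.2.2 2)) (acc, cur, rm)).1,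
     (t.foldl (fun (st : Int × Int × Int) e =>
        if PySem.Int.mod st.2.2 2 = 1 then
          (PySem.Int.bxor st.1 st.2.1, e, PySem.Int.floordiv st.2.2 2)
        else
          (st.1, PySem.Int.bor st.2.1 e, PySem.Int.floordiv st.2.2 2)) (acc, cur, rm)).2.1)
      = walk acc cur rm t := by
  induction t with
  | nil => intro acc cur rm; rfl
  | cons e t ih =>
    intro acc cur rm
    by_cases hm : PySem.Int.mod rm 2 = 1
    · simp only [List.foldl_cons, walk, hm, if_pos]
      exact ih _ _ _
    · simp only [List.foldl_cons, walk, hm, if_false]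
      exact ih _ _ _

theorem pv_parity (K : Nat) :
    (List.range (2 * K)).Perm
      ((List.range K).map (fun j => 2 * j) ++ (List.range K).map (fun j => 2 * j + 1)) := by
  induction K with
  | zero => simp
  | succ K ih =>
    have h1 : 2 * (K + 1) = (2 * K + 1) + 1 := by omega
    rw [h1, List.range_succ, List.range_succ, List.range_succ]
    rw [← Multiset.coe_eq_coe] at ih ⊢
    simp only [List.map_append, ← Multiset.coe_add] at ih ⊢
    rw [ih]
    simp only [List.map_cons, List.map_nil]
    abel

theorem pv_LB1 (t : List Int) : ∀ a0 : Int,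
    ((List.range (2 ^ t.length)).map (fun j : Nat => maskVal a0 t (j : Int))).Perm (vals (a0 :: t)) := by
  induction t with
  | nil => intro a0; simp [vals, maskVal, walk, pv_zero_bxor]
  | cons a1 t ih =>
    intro a0
    have hpow : 2 ^ (a1 :: t).length = 2 * 2 ^ t.length := by
      simp [List.length_cons, pow_succ]; ring
    rw [hpow]
    have e_even : ∀ j : Nat, maskVal a0 (a1 :: t) ((2 * j : Nat) : Int)
        = maskVal (PySem.Int.bor a0 a1) t (j : Nat) := by
      intro j
      have hm' : PySem.Int.mod ((2 * j : Nat) : Int) 2 ≠ 1 := by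
        rw [PySem.Int.mod_eq_emod_of_pos (by norm_num)]; omega
      have hd' : PySem.Int.floordiv ((2 * j : Nat) : Int) 2 = (j : Int) := by
        rw [PySem.Int.floordiv_eq_ediv_of_pos (by norm_num)]; omega
      simp only [maskVal, walk, hm', if_false, hd']
    have e_odd : ∀ j : Nat, maskVal a0 (a1 :: t) ((2 * j + 1 : Nat) : Int)
        = PySem.Int.bxor a0 (maskVal a1 t (j : Nat)) := by
      intro j
      have hm' : PySem.Int.mod ((2 * j + 1 : Nat) : Int) 2 = 1 := by
        rw [PySem.Int.mod_eq_emod_of_pos (by norm_num)]; omega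
      have hd : PySem.Int.floordiv ((2 * j + 1 : Nat) : Int) 2 = (j : Int) := by
        rw [PySem.Int.floordiv_eq_ediv_of_pos (by norm_num)]; omega
      simp only [maskVal, walk, hm', if_pos, hd]
      have hz : PySem.Int.bxor 0 a0 = PySem.Int.bxor a0 0 := PySem.Int.bxor_comm 0 a0
      rw [hz, pv_W1]
      rw [pv_bxor_assoc]
    have hsplit := List.Perm.map (fun j : Nat => maskVal a0 (a1 :: t) (j : Int)) (pv_parity (2 ^ t.length))
    refine hsplit.trans ?_
    rw [List.map_append, List.map_map, List.map_map]
    have he : (List.range (2 ^ t.length)).map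
          ((fun j : Nat => maskVal a0 (a1 :: t) (j : Int)) ∘ (fun j : Nat => 2 * j))
        = (List.range (2 ^ t.length)).map (fun j : Nat => maskVal (PySem.Int.bor a0 a1) t (j : Int)) := by
      refine List.map_congr_left ?_
      intro j _
      simp only [Function.comp]
      exact_mod_cast e_even j
    have ho : (List.range (2 ^ t.length)).map
          ((fun j : Nat => maskVal a0 (a1 :: t) (j : Int)) ∘ (fun j : Nat => 2 * j + 1))
        = ((List.range (2 ^ t.length)).map (fun j : Nat => maskVal a1 t (j : Int))).map
            (fun v => PySem.Int.bxor a0 v) := by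
      rw [List.map_map]
      refine List.map_congr_left ?_
      intro j _
      simp only [Function.comp]
      exact_mod_cast e_odd j
    rw [he, ho]
    have hv : vals (a0 :: a1 :: t)
        = ((vals (a1 :: t)).map (fun v => PySem.Int.bxor a0 v)) ++ vals (PySem.Int.bor a0 a1 :: t) := by
      simp [vals]
    rw [hv]
    refine ((ih (PySem.Int.bor a0 a1)).append ((ih a1).map _)).trans ?_
    exact List.perm_append_comm

theorem pv_walk_fst (t : List Int) (acc cur rm : Int) :
    (t.foldl (fun (st : Int × Int × Int) e =>
        if PySem.Int.mod st.2.2 2 = 1 then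
          (PySem.Int.bxor st.1 st.2.1, e, PySem.Int.floordiv st.2.2 2)
        else
          (st.1, PySem.Int.bor st.2.1 e, PySem.Int.floordiv st.2.2 2)) (acc, cur, rm)).1
      = (walk acc cur rm t).1 := by
  rw [← pv_walk_foldl]

theorem pv_walk_snd (t : List Int) (acc cur rm : Int) :
    (t.foldl (fun (st : Int × Int × Int) e =>
        if PySem.Int.mod st.2.2 2 = 1 then
          (PySem.Int.bxor st.1 st.2.1, e, PySem.Int.floordiv st.2.2 2)
        else
          (st.1, PySem.Int.bor st.2.1 e, PySem.Int.floordiv st.2.2 2)) (acc, cur, rm)).2.1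
      = (walk acc cur rm t).2 := by
  rw [← pv_walk_foldl]

theorem pv_maskVal_eq (a0 : Int) (t : List Int) (rm : Int) :
    PySem.Int.bxor (walk 0 a0 rm t).1 (walk 0 a0 rm t).2 = maskVal a0 t rm := rfl

theorem pv_ostep_match (o : Option Int) (v : Int) :
    (match o with | none => some v | some b => some (min b v)) = ostep o v := by
  cases o <;> rfl

-- B's value in structured form
theorem pv_LB (a0 : Int) (t : List Int) (x : Option Int) :
    some (f_alt (a0 :: t) x)
      = omin ((vals (a0 :: t)).map
          (fun v => PySem.Int.bxor (match x with | none => 0 | some v' => v') v)) := by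
  set base : Int := (match x with | none => 0 | some v' => v') with hbase
  unfold f_alt
  rw [← hbase]
  simp only [List.length_cons, Nat.add_sub_cancel, PySem.List.slice_from_one, List.tail_cons,
    PySem.List.pyGetD_zero_cons]
  rw [if_neg (Nat.succ_ne_zero t.length)]
  simp only [pv_walk_fst, pv_walk_snd, pv_bxor_assoc, pv_maskVal_eq, pv_ostep_match]
  rw [PySem.List.pyRange_zero_natCast, List.foldl_map]
  have homin : (List.range (2 ^ t.length)).foldl
        (fun o (j : Nat) => ostep o (PySem.Int.bxor base (maskVal a0 t (j : Int)))) none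
      = omin ((List.range (2 ^ t.length)).map
          (fun j : Nat => PySem.Int.bxor base (maskVal a0 t (j : Int)))) := by
    rw [omin, List.foldl_map]
  rw [homin]
  have hmm : (List.range (2 ^ t.length)).map
        (fun j : Nat => PySem.Int.bxor base (maskVal a0 t (j : Int)))
      = ((List.range (2 ^ t.length)).map (fun j : Nat => maskVal a0 t (j : Int))).map
          (fun v => PySem.Int.bxor base v) := by
    rw [List.map_map]; rfl
  rw [hmm, pv_omin_perm ((pv_LB1 t a0).map (fun v => PySem.Int.bxor base v))]
  cases hl : (vals (a0 :: t)).map (fun v => PySem.Int.bxor base v) with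
  | nil =>
    exact absurd (List.map_eq_nil_iff.mp hl) (pv_vals_ne _)
  | cons vh vt =>
    rw [pv_omin_cons]
    rfl

theorem pv_none_eq_zero (a : List Int) : f a none = f a (some 0) := by
  conv_lhs => rw [f]
  conv_rhs => rw [f]
  simp [PySem.Int.bxor_zero]

-- ===== VERDICT (by name: the statement is the Claim_ definition above) =====
theorem f_spec : Claim_equal_f := by
  unfold Claim_equal_f
  intro a x _
  show f a x = f_alt a x
  cases a with
  | nil =>
    cases x with
    | none =>
      rw [f]
      simp only [List.length_nil]
      rw [PySem.List.pyRange_one_eq_nil (by norm_num)]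
      simp [f_alt]
    | some b =>
      rw [f]
      simp only [List.length_nil]
      rw [PySem.List.pyRange_one_eq_nil (by norm_num)]
      simp [f_alt, pv_zero_bxor]
  | cons a0 t =>
    cases x with
    | some b =>
      have hA := pv_LA (a0 :: t) (by simp) b
      have hB := pv_LB a0 t (some b)
      have hc : (fun v => PySem.Int.bxor b v) = (fun v => PySem.Int.bxor v b) := by
        funext v; rw [PySem.Int.bxor_comm]
      simp only [hc] at hB
      exact Option.some.inj (hA.trans hB.symm)
    | none =>
      rw [pv_none_eq_zero]
      have hA := pv_LA (a0 :: t) (by simp) 0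
      have hB := pv_LB a0 t none
      have hc : (fun v => PySem.Int.bxor (0:Int) v) = (fun v => PySem.Int.bxor v 0) := by
        funext v; rw [PySem.Int.bxor_comm]
      simp only [hc] at hB
      exact Option.some.inj (hA.trans hB.symm)
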